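-- pv_equiv track=rewrite | github.com/UniqueMani/ASR_final_project | ramc_dialect_asr/scripts/train_dialect.py | labels_from_manifest
-- ===== SOURCE A (Python) =====
-- def labels_from_manifest(items):
--     """majority-vote label per speaker from manifest fields"""
--     spk2labs = {}
--     for it in items:
--         spk = it.get("speaker_id")
--         lab = it.get("dialect") or it.get("accent") or it.get("label")
--         if not spk or lab is None:
--             continue
--         spk2labs.setdefault(spk, []).append(str(lab))
--
--     out = {}
--     for spk, labs in spk2labs.items():
--         if not labs:
--             continue
--         counts = {}
--         for l in labs:
--             counts[l] = counts.get(l, 0) + 1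
--         out[spk] = max(counts, key=counts.get)
--     return out if out else None
-- ===== SOURCE B (Python) =====
-- def labels_from_manifest(items):
--     """majority-vote label per speaker, computed in ONE streaming pass: a running
--     (count, first-seen-rank) argmax is kept per speaker, so no per-speaker label
--     lists are stored and no second counting/argmax phase runs"""
--     counts = {}   # (spk, lab) -> (count, rank of lab's first occurrence for spk)
--     nlabs = {}    # spk -> number of distinct labels seen so far
--     best = {}     # spk -> (count, rank, lab); keys in speaker first-appearance order
--     for it in items:
--         spk = it.get("speaker_id")
--         lab = it.get("dialect") or it.get("accent") or it.get("label")
--         if not spk or lab is None: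
--             continue
--         lab = str(lab)
--         k = (spk, lab)
--         if k in counts:
--             c, r = counts[k]
--             c += 1
--         else:
--             c, r = 1, nlabs.get(spk, 0)
--             nlabs[spk] = r + 1
--         counts[k] = (c, r)
--         b = best.get(spk)
--         if b is None or c > b[0] or (c == b[0] and r < b[1]):
--             best[spk] = (c, r, lab)
--     return {s: t[2] for s, t in best.items()} if best else None
-- ===== Notes on version B (the rewrite author's own statement) =====
-- stated objective: alternative
-- what changed: B replaces A's two-phase group-then-count-then-argmax (per-speaker label lists, then a counting dict and max() per speaker) by a single streaming pass that keeps only a running (count, first-seen-rank) argmax per speaker, so no label lists are stored and no second counting/argmax phase exists.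
import Mathlib
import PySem

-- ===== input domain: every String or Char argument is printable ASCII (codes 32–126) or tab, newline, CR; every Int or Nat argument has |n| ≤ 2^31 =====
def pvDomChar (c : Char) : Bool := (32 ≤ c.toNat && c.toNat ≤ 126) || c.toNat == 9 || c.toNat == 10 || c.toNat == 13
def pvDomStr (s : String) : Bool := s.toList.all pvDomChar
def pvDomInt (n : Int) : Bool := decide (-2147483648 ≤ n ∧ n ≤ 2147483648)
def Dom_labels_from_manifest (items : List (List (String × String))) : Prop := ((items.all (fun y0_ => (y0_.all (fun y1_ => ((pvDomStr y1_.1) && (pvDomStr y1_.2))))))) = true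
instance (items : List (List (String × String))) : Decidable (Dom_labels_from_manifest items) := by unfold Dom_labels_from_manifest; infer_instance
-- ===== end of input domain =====

-- B computes the per-speaker majority label in ONE streaming pass, keeping only a running
-- (count, first-seen-rank) argmax per speaker, instead of A's two-phase group-then-count-then-max;
-- same return value, alternative single-pass algorithm.

-- helpers shared by both ports: these source lines are identical in the two Pythons
def pvGet (it : List (String × String)) (k : String) : Option String :=
  (PySem.Dict.ofList it).get? k

-- Python `x or y` on the optional string values of the or-chain (None and "" are falsy)
def pvOr (x y : Option String) : Option String :=
  match x with
  | some s => if s = "" then y else some s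
  | none => y

-- spk / lab resolution with the `if not spk or lab is None: continue` guard (none = skipped)
def pvResolve (it : List (String × String)) : Option (String × String) :=
  match pvGet it "speaker_id",
        pvOr (pvOr (pvGet it "dialect") (pvGet it "accent")) (pvGet it "label") with
  | some s, some l => if s = "" then none else some (s, l)
  | _, _ => none

-- ===== PORT A =====
-- one iteration of A's collection loop over the manifest items
def pvACollect (d : PySem.Dict String (List String)) (it : List (String × String)) :
    PySem.Dict String (List String) :=
  match pvResolve it with
  -- spk2labs.setdefault(spk, []).append(str(lab))
  | some (s, l) => d.modify s [] (fun labs => labs ++ [l])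
  | none => d

-- one iteration of A's second loop: count the labels of one speaker and take the argmax
def pvAStep (o : PySem.Dict String String) (p : String × List String) : PySem.Dict String String :=
  if p.2 = [] then o
  else
    let counts : PySem.Dict String Int :=
      p.2.foldl (fun c l => c.modify l 0 (fun n => n + 1)) PySem.Dict.empty
    -- max(counts, key=counts.get); counts is nonempty here, so the none branch is unreachable
    match PySem.List.max? counts.keys (fun k => counts.getD k 0) with
    | some m => o.insert p.1 m
    | none => o

def labels_from_manifest (items : List (List (String × String))) : Option (List (String × String)) :=
  let spk2labs : PySem.Dict String (List String) := items.foldl pvACollect PySem.Dict.empty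
  let out : PySem.Dict String String := spk2labs.items.foldl pvAStep PySem.Dict.empty
  if out.items = [] then none else some out.items

-- ===== PORT B =====
-- B's loop state: (counts : (spk,lab) -> (count, rank), nlabs : spk -> #distinct, best : spk -> (count, rank, lab))
def pvBState : Type :=
  PySem.Dict (String × String) (Int × Int) × PySem.Dict String Int × PySem.Dict String (Int × Int × String)

-- `b = best.get(spk); if b is None or c > b[0] or (c == b[0] and r < b[1]): best[spk] = (c, r, lab)`
def pvBestUpd (best : PySem.Dict String (Int × Int × String)) (spk : String) (c r : Int) (lab : String) :
    PySem.Dict String (Int × Int × String) :=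
  match best.get? spk with
  | none => best.insert spk (c, r, lab)
  | some b => if b.1 < c ∨ (c = b.1 ∧ r < b.2.1) then best.insert spk (c, r, lab) else best

-- one loop iteration on a resolved (spk, lab) pair: the `if k in counts … else …` branch
def pvBStep (st : pvBState) (p : String × String) : pvBState :=
  match st.1.get? p with
  | some cr => (st.1.insert p (cr.1 + 1, cr.2), st.2.1, pvBestUpd st.2.2 p.1 (cr.1 + 1) cr.2 p.2)
  | none =>
      let r := st.2.1.getD p.1 0
      (st.1.insert p (1, r), st.2.1.insert p.1 (r + 1), pvBestUpd st.2.2 p.1 1 r p.2)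

-- one iteration of B's single loop over the manifest items
def pvBCollect (st : pvBState) (it : List (String × String)) : pvBState :=
  match pvResolve it with
  | some p => pvBStep st p
  | none => st

def labels_from_manifest_alt (items : List (List (String × String))) : Option (List (String × String)) :=
  let st : pvBState := items.foldl pvBCollect (PySem.Dict.empty, PySem.Dict.empty, PySem.Dict.empty)
  -- return {s: t[2] for s, t in best.items()} if best else None
  if st.2.2.items = [] then none else some (st.2.2.items.map (fun p => (p.1, p.2.2.2)))

-- ===== PRECONDITION & SPEC =====
def Spec_labels_from_manifest (items : List (List (String × String))) (out : Option (List (String × String))) : Prop := out = labels_from_manifest_alt items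
instance (items : List (List (String × String))) (out : Option (List (String × String))) : Decidable (Spec_labels_from_manifest items out) := by unfold Spec_labels_from_manifest; infer_instance

-- ===== CLAIM (what is proved, stated in full; the proofs are below) =====
def Claim_equal_labels_from_manifest : Prop := ∀ (items : List (List (String × String))), Dom_labels_from_manifest items → Spec_labels_from_manifest items (labels_from_manifest items)

-- ===== LEMMAS AND PROOFS =====

-- the stream of resolved (speaker, label) pairs, and the label stream of one speaker
def pvPs (items : List (List (String × String))) : List (String × String) :=
  items.filterMap pvResolve

def pvLabs (ps : List (String × String)) (s : String) : List String :=
  (ps.filter (fun p => p.1 == s)).map (fun p => p.2)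

-- both loops over items only act on resolved pairs
theorem pvFoldResolve {σ : Type} (f : σ → String × String → σ) (items : List (List (String × String))) (s0 : σ) :
    items.foldl (fun st it => match pvResolve it with | some p => f st p | none => st) s0
      = (items.filterMap pvResolve).foldl f s0 := by
  induction items generalizing s0 with
  | nil => rfl
  | cons it rest ih =>
    simp only [List.foldl_cons, List.filterMap_cons]
    cases pvResolve it with
    | none => exact ih s0
    | some p => simp only [List.foldl_cons]; exact ih (f s0 p)

-- ---------- the per-speaker streaming machine (B restricted to one speaker) ----------
def pvPState : Type := PySem.Dict String (Int × Int) × Int × Option (Int × Int × String)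

def pvPBest (b : Option (Int × Int × String)) (c r : Int) (lab : String) : Option (Int × Int × String) :=
  match b with
  | none => some (c, r, lab)
  | some bb => if bb.1 < c ∨ (c = bb.1 ∧ r < bb.2.1) then some (c, r, lab) else some bb

def pvPStep (st : pvPState) (l : String) : pvPState :=
  match st.1.get? l with
  | some cr => (st.1.insert l (cr.1 + 1, cr.2), st.2.1, pvPBest st.2.2 (cr.1 + 1) cr.2 l)
  | none => (st.1.insert l (1, st.2.1), st.2.1 + 1, pvPBest st.2.2 1 st.2.1 l)

def pvPRun (labs : List String) : pvPState := labs.foldl pvPStep (PySem.Dict.empty, 0, none)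

theorem pvPBest_none (c r : Int) (lab : String) : pvPBest none c r lab = some (c, r, lab) := rfl

theorem pvPBest_some (b : Int × Int × String) (c r : Int) (lab : String) :
    pvPBest (some b) c r lab = if b.1 < c ∨ (c = b.1 ∧ r < b.2.1) then some (c, r, lab) else some b := rfl

-- count and first-occurrence rank of a label
def pvCnt (labs : List String) (k : String) : Int := (labs.count k : Int)
def pvIdx (labs : List String) (k : String) : Int :=
  (PySem.List.index? (PySem.Set.ofList labs) k).elim 0 (fun n => (n : Int))

-- the global B state restricted to speaker s is the per-speaker machine run on s's labels
def pvGInv (ps : List (String × String)) (st : pvBState) : Prop :=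
  (∀ s l, st.1.get? (s, l) = (pvPRun (pvLabs ps s)).1.get? l) ∧
  (∀ s, st.2.1.getD s 0 = (pvPRun (pvLabs ps s)).2.1) ∧
  (∀ s, st.2.2.get? s = (pvPRun (pvLabs ps s)).2.2) ∧
  st.2.2.keys = PySem.Set.ofList (ps.map (fun p => p.1))

-- invariant of the per-speaker machine
def pvPInv (labs : List String) (st : pvPState) : Prop :=
  (∀ k, st.1.get? k = if k ∈ labs then some (pvCnt labs k, pvIdx labs k) else none) ∧
  st.2.1 = ((PySem.Set.ofList labs).length : Int) ∧
  (match st.2.2 with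
   | none => labs = []
   | some b => ∃ m, m ∈ labs ∧ b = (pvCnt labs m, pvIdx labs m, m) ∧
       ∀ k ∈ labs, pvCnt labs k < pvCnt labs m ∨ (pvCnt labs k = pvCnt labs m ∧ pvIdx labs m ≤ pvIdx labs k))


-- ---------- arithmetic of counts and first-occurrence ranks under appending one label ----------
theorem pvCnt_append_self (t : List String) (l : String) : pvCnt (t ++ [l]) l = pvCnt t l + 1 := by
  simp [pvCnt, List.count_append]

theorem pvCnt_append_ne (t : List String) (l k : String) (h : k ≠ l) : pvCnt (t ++ [l]) k = pvCnt t k := by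
  simp [pvCnt, List.count_append, Ne.symm h]

theorem pvCnt_pos (t : List String) (k : String) (h : k ∈ t) : 1 ≤ pvCnt t k := by
  unfold pvCnt
  exact_mod_cast List.count_pos_iff.mpr h

theorem pvCnt_of_not_mem (t : List String) (k : String) (h : k ∉ t) : pvCnt t k = 0 := by
  unfold pvCnt
  exact_mod_cast List.count_eq_zero.mpr h

theorem pvIdx_append_of_mem (t : List String) (l k : String) (h : k ∈ t) :
    pvIdx (t ++ [l]) k = pvIdx t k := by
  unfold pvIdx
  rw [PySem.Set.ofList_append_singleton]
  by_cases hl : l ∈ PySem.Set.ofList t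
  · rw [PySem.Set.add_of_mem hl]
  · rw [PySem.Set.add_of_not_mem hl,
        PySem.List.index?_append_of_mem _ ((PySem.Set.mem_ofList t k).mpr h)]

theorem pvIdx_append_self_of_not_mem (t : List String) (l : String) (h : l ∉ t) :
    pvIdx (t ++ [l]) l = ((PySem.Set.ofList t).length : Int) := by
  have hK : l ∉ PySem.Set.ofList t := fun hm => h ((PySem.Set.mem_ofList t l).mp hm)
  unfold pvIdx
  rw [PySem.Set.ofList_append_singleton, PySem.Set.add_of_not_mem hK,
      PySem.List.index?_append_singleton_self _ _ hK]
  rfl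

theorem pvIdx_lt_len (t : List String) (k : String) (h : k ∈ t) :
    pvIdx t k < ((PySem.Set.ofList t).length : Int) := by
  have hm : k ∈ PySem.Set.ofList t := (PySem.Set.mem_ofList t k).mpr h
  have hsome := (PySem.List.index?_isSome_iff (PySem.Set.ofList t) k).mpr hm
  cases hj : PySem.List.index? (PySem.Set.ofList t) k with
  | none => rw [hj] at hsome; simp at hsome
  | some j =>
    obtain ⟨hk, -, -⟩ := PySem.List.getElem_of_index?_eq_some hj
    unfold pvIdx
    rw [hj]
    simp only [Option.elim]
    exact_mod_cast hk

theorem pvPInv_holds (labs : List String) : pvPInv labs (pvPRun labs) := by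
  induction labs using List.reverseRecOn with
  | nil => exact ⟨fun k => rfl, rfl, rfl⟩
  | append_singleton t l ih =>
    obtain ⟨ha, hb, hc⟩ := ih
    have hrun : pvPRun (t ++ [l]) = pvPStep (pvPRun t) l := List.foldl_concat _ _ _ _
    by_cases hl : l ∈ t
    · -- l already seen for this speaker
      have hget : (pvPRun t).1.get? l = some (pvCnt t l, pvIdx t l) := by rw [ha l]; simp [hl]
      have hstep : pvPStep (pvPRun t) l =
          ((pvPRun t).1.insert l (pvCnt t l + 1, pvIdx t l), (pvPRun t).2.1,
            pvPBest (pvPRun t).2.2 (pvCnt t l + 1) (pvIdx t l) l) := by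
        unfold pvPStep; rw [hget]
      refine ⟨?_, ?_, ?_⟩
      · intro k
        rw [hrun, hstep]
        simp only [PySem.Dict.get?_insert]
        by_cases hk : k = l
        · subst hk
          rw [if_pos rfl, if_pos (by simp), pvCnt_append_self, pvIdx_append_of_mem _ _ _ hl]
        · rw [if_neg hk, ha k, pvCnt_append_ne t l k hk]
          by_cases hkt : k ∈ t
          · rw [if_pos hkt, if_pos (by simp [hkt]), pvIdx_append_of_mem t l k hkt]
          · rw [if_neg hkt, if_neg (by simp [hkt, hk])]
      · rw [hrun, hstep]
        show (pvPRun t).2.1 = _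
        rw [hb, PySem.Set.ofList_append_singleton,
            PySem.Set.add_of_mem ((PySem.Set.mem_ofList t l).mpr hl)]

      · rw [hrun, hstep]
        cases hP : (pvPRun t).2.2 with
        | none => rw [hP] at hc; exact absurd (hc ▸ hl) (List.not_mem_nil)
        | some b =>
          rw [hP] at hc
          obtain ⟨m, hm, hbeq, hmax⟩ := hc
          show match pvPBest (some b) (pvCnt t l + 1) (pvIdx t l) l with
            | none => t ++ [l] = []
            | some b' => ∃ m', m' ∈ t ++ [l] ∧
                b' = (pvCnt (t ++ [l]) m', pvIdx (t ++ [l]) m', m') ∧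
                ∀ k ∈ t ++ [l], pvCnt (t ++ [l]) k < pvCnt (t ++ [l]) m' ∨
                  (pvCnt (t ++ [l]) k = pvCnt (t ++ [l]) m' ∧
                    pvIdx (t ++ [l]) m' ≤ pvIdx (t ++ [l]) k)
          rw [pvPBest_some]
          by_cases hcond : b.1 < pvCnt t l + 1 ∨ (pvCnt t l + 1 = b.1 ∧ pvIdx t l < b.2.1)
          · rw [if_pos hcond]
            refine ⟨l, by simp, ?_, ?_⟩
            · rw [pvCnt_append_self, pvIdx_append_of_mem t l l hl]
            · intro k hk
              by_cases hkl : k = l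
              · subst hkl; right; exact ⟨rfl, le_refl _⟩
              · have hkt : k ∈ t := by
                  rcases List.mem_append.mp hk with h' | h'
                  · exact h'
                  · exact absurd (List.mem_singleton.mp h') hkl
                rw [pvCnt_append_ne t l k hkl, pvCnt_append_self,
                    pvIdx_append_of_mem t l k hkt, pvIdx_append_of_mem t l l hl]
                have hbm1 : b.1 = pvCnt t m := by rw [hbeq]
                have hbm2 : b.2.1 = pvIdx t m := by rw [hbeq]
                rw [hbm1, hbm2] at hcond
                rcases hmax k hkt with h' | ⟨h1', h2'⟩
                · rcases hcond with hcc | ⟨hcc, hii⟩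
                  · left; omega
                  · left; omega
                · rcases hcond with hcc | ⟨hcc, hii⟩
                  · left; omega
                  · right; constructor
                    · omega
                    · exact le_of_lt (lt_of_lt_of_le hii h2')
          · rw [if_neg hcond]
            have hbm1 : b.1 = pvCnt t m := by rw [hbeq]
            have hbm2 : b.2.1 = pvIdx t m := by rw [hbeq]
            rw [hbm1, hbm2] at hcond
            rw [not_or, not_lt, not_and, not_lt] at hcond
            obtain ⟨hc1, hc2⟩ := hcond
            have hml : m ≠ l := by
              intro he; subst he; omega
            refine ⟨m, List.mem_append_left _ hm, ?_, ?_⟩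
            · rw [hbeq, pvCnt_append_ne t l m hml, pvIdx_append_of_mem t l m hm]
            · intro k hk
              rw [pvCnt_append_ne t l m hml, pvIdx_append_of_mem t l m hm]
              by_cases hkl : k = l
              · subst hkl
                rw [pvCnt_append_self, pvIdx_append_of_mem _ _ _ hl]
                by_cases heq : pvCnt t k + 1 = pvCnt t m
                · right; exact ⟨heq, hc2 heq⟩
                · left; omega
              · have hkt : k ∈ t := by
                  rcases List.mem_append.mp hk with h' | h'
                  · exact h'
                  · exact absurd (List.mem_singleton.mp h') hkl
                rw [pvCnt_append_ne t l k hkl, pvIdx_append_of_mem t l k hkt]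
                exact hmax k hkt
    · -- l is a new label for this speaker
      have hget : (pvPRun t).1.get? l = none := by rw [ha l]; simp [hl]
      have hstep : pvPStep (pvPRun t) l =
          ((pvPRun t).1.insert l (1, (pvPRun t).2.1), (pvPRun t).2.1 + 1,
            pvPBest (pvPRun t).2.2 1 (pvPRun t).2.1 l) := by
        unfold pvPStep; rw [hget]
      have hKl : l ∉ PySem.Set.ofList t := fun hm => hl ((PySem.Set.mem_ofList t l).mp hm)
      have hK' : PySem.Set.ofList (t ++ [l]) = PySem.Set.ofList t ++ [l] := by
        rw [PySem.Set.ofList_append_singleton, PySem.Set.add_of_not_mem hKl]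
      refine ⟨?_, ?_, ?_⟩
      · intro k
        rw [hrun, hstep]
        simp only [PySem.Dict.get?_insert]
        by_cases hk : k = l
        · subst hk
          rw [if_pos rfl, if_pos (by simp), pvIdx_append_self_of_not_mem t k hl, ← hb]
          have : pvCnt (t ++ [k]) k = 1 := by
            rw [pvCnt_append_self, pvCnt_of_not_mem t k hl]
            omega
          rw [this]
        · rw [if_neg hk, ha k, pvCnt_append_ne t l k hk]
          by_cases hkt : k ∈ t
          · rw [if_pos hkt, if_pos (by simp [hkt]), pvIdx_append_of_mem t l k hkt]
          · rw [if_neg hkt, if_neg (by simp [hkt, hk])]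
      · rw [hrun, hstep]
        show (pvPRun t).2.1 + 1 = _
        rw [hb, hK']
        push_cast [List.length_append, List.length_singleton]
        omega
      · rw [hrun, hstep]
        show match pvPBest (pvPRun t).2.2 1 (pvPRun t).2.1 l with
          | none => t ++ [l] = []
          | some b' => ∃ m', m' ∈ t ++ [l] ∧
              b' = (pvCnt (t ++ [l]) m', pvIdx (t ++ [l]) m', m') ∧
              ∀ k ∈ t ++ [l], pvCnt (t ++ [l]) k < pvCnt (t ++ [l]) m' ∨
                (pvCnt (t ++ [l]) k = pvCnt (t ++ [l]) m' ∧
                  pvIdx (t ++ [l]) m' ≤ pvIdx (t ++ [l]) k)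
        cases hP : (pvPRun t).2.2 with
        | none =>
          rw [hP] at hc
          have hc' : t = [] := hc
          subst hc'
          rw [pvPBest_none]
          refine ⟨l, by simp, ?_, ?_⟩
          · have h1 : pvCnt ([] ++ [l]) l = 1 := by
              rw [pvCnt_append_self, pvCnt_of_not_mem [] l (List.not_mem_nil)]
              omega
            have h2 : pvIdx ([] ++ [l]) l = 0 := by
              rw [pvIdx_append_self_of_not_mem [] l (List.not_mem_nil)]; rfl
            have h3 : (pvPRun ([] : List String)).2.1 = 0 := rfl
            rw [h1, h2, h3]
          · intro k hk
            simp only [List.nil_append, List.mem_singleton] at hk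
            subst hk
            right; exact ⟨rfl, le_refl _⟩
        | some b =>
          rw [hP] at hc
          obtain ⟨m, hm, hbeq, hmax⟩ := hc
          have hbm1 : b.1 = pvCnt t m := by rw [hbeq]
          have hbm2 : b.2.1 = pvIdx t m := by rw [hbeq]
          have hml : m ≠ l := fun he => hl (he ▸ hm)
          have hcm : 1 ≤ pvCnt t m := pvCnt_pos t m hm
          have him : pvIdx t m < (pvPRun t).2.1 := by rw [hb]; exact pvIdx_lt_len t m hm
          rw [pvPBest_some, if_neg (by omega)]
          refine ⟨m, List.mem_append_left _ hm, ?_, ?_⟩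
          · rw [hbeq, pvCnt_append_ne t l m hml, pvIdx_append_of_mem t l m hm]
          · intro k hk
            rw [pvCnt_append_ne t l m hml, pvIdx_append_of_mem t l m hm]
            by_cases hkl : k = l
            · subst hkl
              have h1 : pvCnt (t ++ [k]) k = 1 := by
                rw [pvCnt_append_self, pvCnt_of_not_mem t k hl]
                omega
              rw [h1, pvIdx_append_self_of_not_mem t k hl, ← hb]
              by_cases heq : pvCnt t m = 1
              · right; exact ⟨heq.symm, le_of_lt him⟩
              · left; omega
            · have hkt : k ∈ t := by
                rcases List.mem_append.mp hk with h' | h'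
                · exact h'
                · exact absurd (List.mem_singleton.mp h') hkl
              rw [pvCnt_append_ne t l k hkl, pvIdx_append_of_mem t l k hkt]
              exact hmax k hkt
-- lookups and keys of the best-dict after one update
theorem pvBestUpd_get? (best : PySem.Dict String (Int × Int × String)) (spk : String) (c r : Int)
    (lab : String) (s : String) :
    (pvBestUpd best spk c r lab).get? s
      = if s = spk then pvPBest (best.get? spk) c r lab else best.get? s := by
  unfold pvBestUpd
  cases hb : best.get? spk with
  | none => rw [PySem.Dict.get?_insert, pvPBest_none]
  | some b =>
    show (if b.1 < c ∨ (c = b.1 ∧ r < b.2.1) then best.insert spk (c, r, lab) else best).get? s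
        = if s = spk then pvPBest (some b) c r lab else best.get? s
    rw [pvPBest_some]
    by_cases hcond : b.1 < c ∨ (c = b.1 ∧ r < b.2.1)
    · rw [if_pos hcond, PySem.Dict.get?_insert, if_pos hcond]
    · rw [if_neg hcond]
      by_cases hs : s = spk
      · rw [if_pos hs, hs, hb, if_neg hcond]
      · rw [if_neg hs]

theorem pvBestUpd_keys (best : PySem.Dict String (Int × Int × String)) (spk : String) (c r : Int)
    (lab : String) :
    (pvBestUpd best spk c r lab).keys
      = if spk ∈ best.keys then best.keys else best.keys ++ [spk] := by
  unfold pvBestUpd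
  cases hb : best.get? spk with
  | none =>
    have hnm : spk ∉ best.keys := (PySem.Dict.get?_eq_none_iff_not_mem_keys best spk).mp hb
    have hcont : best.contains spk = false := by
      rw [PySem.Dict.contains_eq_isSome_get?, hb]; rfl
    rw [PySem.Dict.keys_insert_of_not_contains best _ hcont, if_neg hnm]
  | some b =>
    have hmem : spk ∈ best.keys := by
      by_contra hm
      rw [← PySem.Dict.get?_eq_none_iff_not_mem_keys] at hm
      rw [hm] at hb
      cases hb
    have hcont : best.contains spk = true := (PySem.Dict.contains_iff_mem_keys best spk).mpr hmem
    show (if b.1 < c ∨ (c = b.1 ∧ r < b.2.1) then best.insert spk (c, r, lab) else best).keys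
        = if spk ∈ best.keys then best.keys else best.keys ++ [spk]
    by_cases hcond : b.1 < c ∨ (c = b.1 ∧ r < b.2.1)
    · rw [if_pos hcond, PySem.Dict.keys_insert_of_contains best _ hcont, if_pos hmem]
    · rw [if_neg hcond, if_pos hmem]

theorem pvLabs_append (ps : List (String × String)) (q : String × String) (s : String) :
    pvLabs (ps ++ [q]) s = pvLabs ps s ++ (if q.1 = s then [q.2] else []) := by
  unfold pvLabs
  rw [List.filter_append, List.map_append]
  congr 1
  by_cases h : q.1 = s
  · rw [if_pos h]
    simp [h]
  · rw [if_neg h]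
    simp [h]

theorem pvLabs_ne_nil (ps : List (String × String)) (s : String)
    (hs : s ∈ PySem.Set.ofList (ps.map (fun p => p.1))) : pvLabs ps s ≠ [] := by
  rw [PySem.Set.mem_ofList] at hs
  obtain ⟨q, hq, hq1⟩ := List.mem_map.mp hs
  intro hnil
  unfold pvLabs at hnil
  rw [List.map_eq_nil_iff] at hnil
  have hmem : q ∈ ps.filter (fun p => p.1 == s) := List.mem_filter.mpr ⟨hq, by simp [hq1]⟩
  rw [hnil] at hmem
  simp at hmem

theorem pvGInv_holds (ps : List (String × String)) :
    pvGInv ps (ps.foldl pvBStep (PySem.Dict.empty, PySem.Dict.empty, PySem.Dict.empty)) := by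
  induction ps using List.reverseRecOn with
  | nil => exact ⟨fun s l => rfl, fun s => rfl, fun s => rfl, rfl⟩
  | append_singleton ps q ih =>
    obtain ⟨ih1, ih2, ih3, ih4⟩ := ih
    obtain ⟨s0, l0⟩ := q
    have hrun : (ps ++ [(s0, l0)]).foldl pvBStep (PySem.Dict.empty, PySem.Dict.empty, PySem.Dict.empty)
        = pvBStep (ps.foldl pvBStep (PySem.Dict.empty, PySem.Dict.empty, PySem.Dict.empty)) (s0, l0) :=
      List.foldl_concat _ _ _ _
    set st := ps.foldl pvBStep (PySem.Dict.empty, PySem.Dict.empty, PySem.Dict.empty) with hstdef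
    have hlabs0 : pvLabs (ps ++ [(s0, l0)]) s0 = pvLabs ps s0 ++ [l0] := by
      rw [pvLabs_append ps (s0, l0) s0, if_pos rfl]
    have hlabsne : ∀ s, s0 ≠ s → pvLabs (ps ++ [(s0, l0)]) s = pvLabs ps s := by
      intro s hne
      rw [pvLabs_append ps (s0, l0) s, if_neg hne, List.append_nil]
    have hprun0 : pvPRun (pvLabs (ps ++ [(s0, l0)]) s0) = pvPStep (pvPRun (pvLabs ps s0)) l0 := by
      rw [hlabs0]; exact List.foldl_concat _ _ _ _
    have hkeys4 : ∀ c r,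
        (pvBestUpd st.2.2 s0 c r l0).keys = PySem.Set.ofList ((ps ++ [(s0, l0)]).map (fun p => p.1)) := by
      intro c r
      rw [pvBestUpd_keys, ih4]
      simp only [List.map_append, List.map_cons, List.map_nil]
      rw [PySem.Set.ofList_append_singleton, PySem.Set.add_eq_ite]
    cases hq : (pvPRun (pvLabs ps s0)).1.get? l0 with
    | some cr =>
      have hget : st.1.get? (s0, l0) = some cr := by rw [ih1 s0 l0, hq]
      have hstep : pvBStep st (s0, l0)
          = (st.1.insert (s0, l0) (cr.1 + 1, cr.2), st.2.1,
              pvBestUpd st.2.2 s0 (cr.1 + 1) cr.2 l0) := by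
        unfold pvBStep; rw [hget]
      have hpstep : pvPStep (pvPRun (pvLabs ps s0)) l0
          = ((pvPRun (pvLabs ps s0)).1.insert l0 (cr.1 + 1, cr.2), (pvPRun (pvLabs ps s0)).2.1,
              pvPBest (pvPRun (pvLabs ps s0)).2.2 (cr.1 + 1) cr.2 l0) := by
        unfold pvPStep; rw [hq]
      refine ⟨?_, ?_, ?_, ?_⟩
      · intro s l
        rw [hrun, hstep]
        show (st.1.insert (s0, l0) (cr.1 + 1, cr.2)).get? (s, l) = _
        by_cases hs : s0 = s
        · subst hs
          rw [hprun0, hpstep]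
          show _ = ((pvPRun (pvLabs ps s0)).1.insert l0 (cr.1 + 1, cr.2)).get? l
          rw [PySem.Dict.get?_insert, PySem.Dict.get?_insert]
          by_cases hl : l = l0
          · rw [if_pos (by rw [hl]), if_pos hl]
          · rw [if_neg (by simp [hl]), if_neg hl, ih1 s0 l]
        · rw [hlabsne s hs, PySem.Dict.get?_insert,
              if_neg (fun he => hs (congrArg Prod.fst he).symm), ih1 s l]
      · intro s
        rw [hrun, hstep]
        show st.2.1.getD s 0 = _
        by_cases hs : s0 = s
        · subst hs; rw [hprun0, hpstep]; exact ih2 s0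
        · rw [hlabsne s hs]; exact ih2 s
      · intro s
        rw [hrun, hstep]
        show (pvBestUpd st.2.2 s0 (cr.1 + 1) cr.2 l0).get? s = _
        rw [pvBestUpd_get?]
        by_cases hs : s = s0
        · subst hs; rw [if_pos rfl, hprun0, hpstep, ih3 s]
        · rw [if_neg hs, hlabsne s (fun he => hs he.symm), ih3 s]
      · rw [hrun, hstep]
        show (pvBestUpd st.2.2 s0 (cr.1 + 1) cr.2 l0).keys = _
        exact hkeys4 _ _
    | none =>
      have hget : st.1.get? (s0, l0) = none := by rw [ih1 s0 l0, hq]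
      have hstep : pvBStep st (s0, l0)
          = (st.1.insert (s0, l0) (1, st.2.1.getD s0 0), st.2.1.insert s0 (st.2.1.getD s0 0 + 1),
              pvBestUpd st.2.2 s0 1 (st.2.1.getD s0 0) l0) := by
        unfold pvBStep; rw [hget]
      have hr : st.2.1.getD s0 0 = (pvPRun (pvLabs ps s0)).2.1 := ih2 s0
      have hpstep : pvPStep (pvPRun (pvLabs ps s0)) l0
          = ((pvPRun (pvLabs ps s0)).1.insert l0 (1, (pvPRun (pvLabs ps s0)).2.1),
              (pvPRun (pvLabs ps s0)).2.1 + 1,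
              pvPBest (pvPRun (pvLabs ps s0)).2.2 1 (pvPRun (pvLabs ps s0)).2.1 l0) := by
        unfold pvPStep; rw [hq]
      refine ⟨?_, ?_, ?_, ?_⟩
      · intro s l
        rw [hrun, hstep]
        show (st.1.insert (s0, l0) (1, st.2.1.getD s0 0)).get? (s, l) = _
        by_cases hs : s0 = s
        · subst hs
          rw [hprun0, hpstep]
          show _ = ((pvPRun (pvLabs ps s0)).1.insert l0 (1, (pvPRun (pvLabs ps s0)).2.1)).get? l
          rw [PySem.Dict.get?_insert, PySem.Dict.get?_insert, hr]
          by_cases hl : l = l0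
          · rw [if_pos (by rw [hl]), if_pos hl]
          · rw [if_neg (by simp [hl]), if_neg hl, ih1 s0 l]
        · rw [hlabsne s hs, PySem.Dict.get?_insert,
              if_neg (fun he => hs (congrArg Prod.fst he).symm), ih1 s l]
      · intro s
        rw [hrun, hstep]
        show (st.2.1.insert s0 (st.2.1.getD s0 0 + 1)).getD s 0 = _
        rw [PySem.Dict.getD_insert]
        by_cases hs : s = s0
        · rw [if_pos hs, hs, hprun0, hpstep, hr]
        · rw [if_neg hs, hlabsne s (fun he => hs he.symm), ih2 s]
      · intro s
        rw [hrun, hstep]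
        show (pvBestUpd st.2.2 s0 1 (st.2.1.getD s0 0) l0).get? s = _
        rw [pvBestUpd_get?]
        by_cases hs : s = s0
        · subst hs; rw [if_pos rfl, hprun0, hpstep, ih3 s, hr]
        · rw [if_neg hs, hlabsne s (fun he => hs he.symm), ih3 s]
      · rw [hrun, hstep]
        show (pvBestUpd st.2.2 s0 1 (st.2.1.getD s0 0) l0).keys = _
        exact hkeys4 _ _

-- Python max() keeps the FIRST maximal element
theorem pvMax?_stay {α : Type} (f : α → Int) (a : α) (l : List α) (h : ∀ y ∈ l, f y ≤ f a) :
    l.foldl (fun acc x => match acc with | none => some x | some m => if f m < f x then some x else some m)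
      (some a) = some a := by
  induction l with
  | nil => rfl
  | cons x t ih =>
    simp only [List.foldl_cons]
    rw [if_neg (by exact not_lt.mpr (h x (by simp)))]
    exact ih (fun y hy => h y (by simp [hy]))

theorem pvMax?_go {α : Type} (f : α → Int) (m : α) (suf : List α) (h2 : ∀ y ∈ suf, f y ≤ f m) :
    ∀ (pre : List α), (∀ y ∈ pre, f y < f m) → ∀ (a : α), f a < f m →
    (pre ++ m :: suf).foldl
      (fun acc x => match acc with | none => some x | some mm => if f mm < f x then some x else some mm)
      (some a) = some m := by
  intro pre
  induction pre with
  | nil =>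
    intro _ a ha
    simp only [List.nil_append, List.foldl_cons]
    rw [if_pos ha]
    exact pvMax?_stay f m suf h2
  | cons x t ih =>
    intro h1 a ha
    simp only [List.cons_append, List.foldl_cons]
    by_cases hx : f a < f x
    · rw [if_pos hx]
      exact ih (fun y hy => h1 y (by simp [hy])) x (h1 x (by simp))
    · rw [if_neg hx]
      exact ih (fun y hy => h1 y (by simp [hy])) a ha

theorem pvMax?_first {α : Type} (f : α → Int) (pre suf : List α) (m : α)
    (h1 : ∀ y ∈ pre, f y < f m) (h2 : ∀ y ∈ suf, f y ≤ f m) :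
    PySem.List.max? (pre ++ m :: suf) f = some m := by
  show (pre ++ m :: suf).foldl
      (fun acc x => match acc with | none => some x | some mm => if f mm < f x then some x else some mm)
      none = some m
  cases pre with
  | nil =>
    simp only [List.nil_append, List.foldl_cons]
    exact pvMax?_stay f m suf h2
  | cons x t =>
    simp only [List.cons_append, List.foldl_cons]
    exact pvMax?_go f m suf h2 t (fun y hy => h1 y (by simp [hy])) x (h1 x (by simp))

-- the streaming argmax agrees with A's max(counts, key=counts.get)
theorem pvPick_eq (labs : List String) (h : labs ≠ []) :
    ∃ c r m, (pvPRun labs).2.2 = some (c, r, m) ∧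
      PySem.List.max? (PySem.Dict.counter labs).keys
        (fun k => (PySem.Dict.counter labs).getD k 0) = some m := by
  obtain ⟨-, -, hc⟩ := pvPInv_holds labs
  cases hP : (pvPRun labs).2.2 with
  | none => rw [hP] at hc; exact absurd hc h
  | some b =>
    rw [hP] at hc
    obtain ⟨m, hm, hbeq, hmax⟩ := hc
    refine ⟨pvCnt labs m, pvIdx labs m, m, by rw [hbeq], ?_⟩
    have hmK : m ∈ PySem.Set.ofList labs := (PySem.Set.mem_ofList labs m).mpr hm
    have hsome := (PySem.List.index?_isSome_iff (PySem.Set.ofList labs) m).mpr hmK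
    cases hj : PySem.List.index? (PySem.Set.ofList labs) m with
    | none => rw [hj] at hsome; simp at hsome
    | some j =>
      obtain ⟨pre, suf, hKeq, hlen, hmpre⟩ := (PySem.List.index?_eq_some_iff _ _ _).mp hj
      have hidxm : pvIdx labs m = (j : Int) := by unfold pvIdx; rw [hj]; rfl
      rw [PySem.Dict.keys_counter, hKeq]
      apply pvMax?_first
      · intro y hy
        have hyK : y ∈ PySem.Set.ofList labs := by rw [hKeq]; exact List.mem_append_left _ hy
        have hyl : y ∈ labs := (PySem.Set.mem_ofList labs y).mp hyK
        have hys := (PySem.List.index?_isSome_iff (PySem.Set.ofList labs) y).mpr hyK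
        have hylt : pvIdx labs y < (j : Int) := by
          cases hi : PySem.List.index? (PySem.Set.ofList labs) y with
          | none => rw [hi] at hys; simp at hys
          | some i =>
            have hiy : PySem.List.index? (PySem.Set.ofList labs) y = some i := hi
            rw [hKeq, PySem.List.index?_append_of_mem _ hy] at hiy
            obtain ⟨pre', suf', hpe, hlen', -⟩ := (PySem.List.index?_eq_some_iff _ _ _).mp hiy
            have hilt : i < pre.length := by
              rw [← hlen', hpe]
              simp only [List.length_append, List.length_cons]
              omega
            unfold pvIdx
            rw [hi]
            simp only [Option.elim]
            omega
        rcases hmax y hyl with h' | ⟨-, h2'⟩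
        · simp only [PySem.Dict.getD_counter]
          unfold pvCnt at h'
          exact_mod_cast h'
        · exfalso
          rw [hidxm] at h2'
          omega
      · intro y hy
        have hyK : y ∈ PySem.Set.ofList labs := by
          rw [hKeq]; exact List.mem_append_right _ (List.mem_cons_of_mem _ hy)
        have hyl : y ∈ labs := (PySem.Set.mem_ofList labs y).mp hyK
        rcases hmax y hyl with h' | ⟨h1', -⟩
        · simp only [PySem.Dict.getD_counter]
          unfold pvCnt at h'
          exact_mod_cast le_of_lt h'
        · simp only [PySem.Dict.getD_counter]
          unfold pvCnt at h1'
          exact_mod_cast le_of_eq h1' 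

-- A's chosen label per speaker (with an irrelevant default, used only on nonempty labs)
def pvApick (labs : List String) : String :=
  (PySem.List.max? (PySem.Dict.counter labs).keys
    (fun k => (PySem.Dict.counter labs).getD k 0)).getD ""

theorem pvA_eq (items : List (List (String × String))) :
    labels_from_manifest items =
      (if (PySem.Set.ofList ((pvPs items).map (fun p => p.1)) : List String) = [] then none
       else some ((PySem.Set.ofList ((pvPs items).map (fun p => p.1))).map
         (fun s => (s, pvApick (pvLabs (pvPs items) s))))) := by
  simp only [labels_from_manifest]
  unfold pvPs
  set ps := items.filterMap pvResolve with hps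
  have hAC : items.foldl pvACollect PySem.Dict.empty
      = items.foldl (fun st it => match pvResolve it with
          | some p => st.modify p.1 [] (fun x => x ++ [p.2])
          | none => st) PySem.Dict.empty := by
    apply PySem.List.foldl_congr_mem
    intro acc x _
    unfold pvACollect
    cases pvResolve x with
    | none => rfl
    | some q => obtain ⟨a, b⟩ := q; rfl
  rw [hAC, pvFoldResolve, ← hps]
  set D := ps.foldl (fun d p => d.modify p.1 [] (fun x => x ++ [p.2])) PySem.Dict.empty with hDdef
  have hkeys : D.keys = PySem.Set.ofList (ps.map (fun p => p.1)) := by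
    rw [hDdef, PySem.Dict.keys_foldl_modify_key, PySem.Dict.keys_empty, PySem.Set.update_nil_left]
  have hgetD : ∀ s, D.getD s [] = pvLabs ps s := by
    intro s
    rw [hDdef, PySem.Dict.getD_foldl_modify_append, PySem.Dict.getD_empty, List.nil_append]
    rfl
  have hnodup : D.keys.Nodup := by rw [hkeys]; exact PySem.Set.nodup_ofList _
  have hitems : D.items = (PySem.Set.ofList (ps.map (fun p => p.1))).map (fun s => (s, pvLabs ps s)) := by
    rw [PySem.Dict.items_eq_map_keys D hnodup [], hkeys]
    exact List.map_congr_left (fun s _ => by rw [hgetD s])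
  have hc2 : ∀ (o : PySem.Dict String String) (q : String × List String), q ∈ D.items →
      pvAStep o q = o.insert q.1 (pvApick q.2) := by
    intro o q hq
    rw [hitems] at hq
    obtain ⟨s, hs, hqe⟩ := List.mem_map.mp hq
    have hq1 : q.1 = s := by rw [← hqe]
    have hq2 : q.2 = pvLabs ps s := by rw [← hqe]
    obtain ⟨c, r, m, -, hmax⟩ := pvPick_eq (pvLabs ps s) (pvLabs_ne_nil ps s hs)
    simp only [pvAStep]
    rw [hq2, hq1, if_neg (pvLabs_ne_nil ps s hs)]
    show (match PySem.List.max? (PySem.Dict.counter (pvLabs ps s)).keys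
        (fun k => (PySem.Dict.counter (pvLabs ps s)).getD k 0) with
      | some m => o.insert s m
      | none => o) = o.insert s (pvApick (pvLabs ps s))
    rw [hmax]
    unfold pvApick
    rw [hmax]
    rfl
  rw [PySem.List.foldl_congr_mem D.items pvAStep
        (fun o q => o.insert q.1 (pvApick q.2)) PySem.Dict.empty hc2]
  have hfresh := PySem.Dict.items_foldl_insert_fresh D.items (fun p => p.1) (fun p => pvApick p.2)
    PySem.Dict.empty (fun a _ => PySem.Dict.contains_empty _) hnodup
  simp only at hfresh
  rw [hfresh]
  have hempty : (PySem.Dict.empty : PySem.Dict String String).items = [] := rfl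
  rw [hempty, List.nil_append, hitems, List.map_map]
  by_cases hsp : PySem.Set.ofList (ps.map (fun p => p.1)) = []
  · rw [hsp]; simp
  · rw [if_neg (by simp [List.map_eq_nil_iff, hsp]), if_neg hsp]
    exact congrArg some (List.map_congr_left (fun s _ => rfl))

theorem pvB_eq (items : List (List (String × String))) :
    labels_from_manifest_alt items =
      (if (PySem.Set.ofList ((pvPs items).map (fun p => p.1)) : List String) = [] then none
       else some ((PySem.Set.ofList ((pvPs items).map (fun p => p.1))).map
         (fun s => (s, pvApick (pvLabs (pvPs items) s))))) := by
  simp only [labels_from_manifest_alt]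
  unfold pvPs
  set ps := items.filterMap pvResolve with hps
  have hBfold : items.foldl pvBCollect (PySem.Dict.empty, PySem.Dict.empty, PySem.Dict.empty)
      = ps.foldl pvBStep (PySem.Dict.empty, PySem.Dict.empty, PySem.Dict.empty) :=
    pvFoldResolve _ items _
  rw [hBfold]
  set st := ps.foldl pvBStep (PySem.Dict.empty, PySem.Dict.empty, PySem.Dict.empty) with hstdef
  obtain ⟨h1, h2, h3, h4⟩ := pvGInv_holds ps
  have hnodup : st.2.2.keys.Nodup := by rw [h4]; exact PySem.Set.nodup_ofList _
  have hitems : st.2.2.items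
      = (PySem.Set.ofList (ps.map (fun p => p.1))).map (fun s => (s, st.2.2.getD s (0, 0, ""))) := by
    rw [PySem.Dict.items_eq_map_keys st.2.2 hnodup (0, 0, ""), h4]
  have hval : ∀ s, s ∈ PySem.Set.ofList (ps.map (fun p => p.1)) →
      (st.2.2.getD s (0, 0, "")).2.2 = pvApick (pvLabs ps s) := by
    intro s hs
    obtain ⟨c, r, m, hsome, hmax⟩ := pvPick_eq (pvLabs ps s) (pvLabs_ne_nil ps s hs)
    rw [PySem.Dict.getD_eq_get?_getD, h3 s, hsome]
    unfold pvApick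
    rw [hmax]
    rfl
  rw [hitems, List.map_map]
  by_cases hsp : PySem.Set.ofList (ps.map (fun p => p.1)) = []
  · rw [hsp]; simp
  · rw [if_neg (by simp [List.map_eq_nil_iff, hsp]), if_neg hsp]
    exact congrArg some (List.map_congr_left (fun s hsm => by
      show (s, (st.2.2.getD s (0, 0, "")).2.2) = (s, pvApick (pvLabs ps s))
      rw [hval s hsm]))

-- ===== VERDICT (by name: the statement is the Claim_ definition above) =====
theorem labels_from_manifest_spec : Claim_equal_labels_from_manifest := by
  intro items _
  show labels_from_manifest items = labels_from_manifest_alt items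
  rw [pvA_eq, pvB_eq]
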